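-- pv_equiv track=rewrite | github.com/Dcbaas/MTH325Prj | Relations&Digraphs.py | is_trans
-- ===== SOURCE A (Python) =====
-- def is_trans(ground, relation):  # Takes digraph as input
--     for A in ground:  # For each element
--         tempList = []  # Creates empty list that will be filled with required relations
--         for rel in relation:  # For each relation
--             if rel[0] == A:  # If A relates to another element
--                 B = rel[1]  # That element becomes B
--                 for rel2 in relation:  # Check each relation again
--                     if rel2[0] == B:  # If B relates to another element
--                         tempList.append(rel2[1])  # Then append it to the list of required relations for A
--         for C in tempList:  # For each element of our required list
--             value = False  # Assume that the required relation does not exist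
--             for rel3 in relation:  # For each relation
--                 if rel3[0] == A and rel3[1] == C:  # If A relates to C
--                     value = True  # The relation does exist
--             if not value:  # If the relation does not exist
--                 return False  # The digraph is not Transitive
--     return True  # If we have not yet disproved it, the digraph must be transitive
-- ===== SOURCE B (Python) =====
-- def is_trans(ground, relation):
--     pairs = set(relation)
--     gs = set(ground)
--     adj = {}
--     for x, y in relation:
--         adj.setdefault(x, []).append(y)
--     for a, b in relation:
--         if a in gs:
--             for c in adj.get(b, []):
--                 if (a, c) not in pairs:
--                     return False
--     return True
-- ===== Notes on version B (the rewrite author's own statement) =====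
-- stated objective: faster
-- what changed: Replaces A's per-ground-element triple scan of the relation with a one-pass adjacency dict plus a pair set, testing each composable pair (a,b),(b,c) by hashed membership.
import Mathlib
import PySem

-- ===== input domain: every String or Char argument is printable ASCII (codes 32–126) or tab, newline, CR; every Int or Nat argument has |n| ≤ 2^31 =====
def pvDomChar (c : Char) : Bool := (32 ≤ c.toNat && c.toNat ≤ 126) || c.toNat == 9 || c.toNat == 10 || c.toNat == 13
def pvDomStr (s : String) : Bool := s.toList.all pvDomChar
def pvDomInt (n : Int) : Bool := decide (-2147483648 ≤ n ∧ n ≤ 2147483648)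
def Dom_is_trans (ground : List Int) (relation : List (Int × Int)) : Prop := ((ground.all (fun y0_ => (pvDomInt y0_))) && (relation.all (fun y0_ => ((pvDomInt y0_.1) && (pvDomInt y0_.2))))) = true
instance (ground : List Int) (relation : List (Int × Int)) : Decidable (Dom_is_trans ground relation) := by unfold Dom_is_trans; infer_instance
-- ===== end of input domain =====

-- B replaces A's per-ground-element triple scan of the relation by a one-pass adjacency
-- dict plus a set of pairs, testing each composable pair by membership (objective: faster).


-- ===== PORT A =====
-- loop 'for A in ground' with early 'return False' as structural recursion on ground
def isTransGo (relation : List (Int × Int)) : List Int → Bool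
  | [] => true
  | a :: rest =>
    let tempList := relation.foldl (fun acc rel =>
      if rel.1 == a then
        relation.foldl (fun acc2 rel2 =>
          if rel2.1 == rel.2 then acc2 ++ [rel2.2] else acc2) acc
      else acc) []
    if tempList.all (fun c =>
        relation.foldl (fun v rel3 =>
          if rel3.1 == a && rel3.2 == c then true else v) false)
    then isTransGo relation rest else false

def is_trans (ground : List Int) (relation : List (Int × Int)) : Bool :=
  isTransGo relation ground

-- ===== PORT B =====
def is_trans_alt (ground : List Int) (relation : List (Int × Int)) : Bool :=
  let pairs : PySem.Set (Int × Int) := PySem.Set.ofList relation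
  let gs : PySem.Set Int := PySem.Set.ofList ground
  let adj : PySem.Dict Int (List Int) :=
    relation.foldl (fun d p => d.modify p.1 [] (fun l => l ++ [p.2])) PySem.Dict.empty
  relation.all (fun p => !(gs.contains p.1) ||
    (adj.getD p.2 []).all (fun c => pairs.contains (p.1, c)))

-- ===== PRECONDITION & SPEC =====
def Spec_is_trans (ground : List Int) (relation : List (Int × Int)) (out : Bool) : Prop := out = is_trans_alt ground relation
instance (ground : List Int) (relation : List (Int × Int)) (out : Bool) : Decidable (Spec_is_trans ground relation out) := by unfold Spec_is_trans; infer_instance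

-- ===== CLAIM (what is proved, stated in full; the proofs are below) =====
def Claim_equal_is_trans : Prop := ∀ (ground : List Int) (relation : List (Int × Int)), Dom_is_trans ground relation → Spec_is_trans ground relation (is_trans ground relation)

-- ===== LEMMAS AND PROOFS =====

-- 'value' accumulator loop of A is an 'any'
theorem foldl_if_true {α : Type} (p : α → Bool) (xs : List α) (b : Bool) :
    xs.foldl (fun v x => if p x then true else v) b = (b || xs.any p) := by
  induction xs generalizing b with
  | nil => simp
  | cons x xs ih =>
    simp only [List.foldl_cons, List.any_cons, ih]
    by_cases h : p x = true <;> simp [h]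

-- membership in A's tempList for element a
theorem tempList_mem (rs full : List (Int × Int)) (a c : Int) (acc : List Int) :
    (c ∈ rs.foldl (fun acc rel =>
      if rel.1 == a then
        full.foldl (fun acc2 rel2 =>
          if rel2.1 == rel.2 then acc2 ++ [rel2.2] else acc2) acc
      else acc) acc) ↔
    c ∈ acc ∨ ∃ p ∈ rs, p.1 = a ∧ ∃ q ∈ full, q.1 = p.2 ∧ q.2 = c := by
  induction rs generalizing acc with
  | nil => simp
  | cons r rs ih =>
    simp only [List.foldl_cons, ih, List.mem_cons]
    by_cases h : r.1 = a
    · simp only [h, beq_self_eq_true, if_pos,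
        PySem.List.foldl_append_if (fun rel2 => rel2.1 == r.2) (fun rel2 => rel2.2) full acc,
        List.mem_append, List.mem_map, List.mem_filter]
      constructor
      · rintro (((hc | ⟨q, ⟨hq, hq1⟩, hq2⟩) | ⟨p, hp, h1, h2⟩))
        · exact Or.inl hc
        · exact Or.inr ⟨r, Or.inl rfl, h, q, hq, by simpa using hq1, hq2⟩
        · exact Or.inr ⟨p, Or.inr hp, h1, h2⟩
      · rintro (hc | ⟨p, (rfl | hp), h1, q, hq, hq1, hq2⟩)
        · exact Or.inl (Or.inl hc)
        · exact Or.inl (Or.inr ⟨q, ⟨hq, by simpa using hq1⟩, hq2⟩)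
        · exact Or.inr ⟨p, hp, h1, q, hq, hq1, hq2⟩
    · have : (r.1 == a) = false := by simpa using h
      simp only [this, Bool.false_eq_true]
      constructor
      · rintro (hc | ⟨p, hp, h1, hrest⟩)
        · exact Or.inl hc
        · exact Or.inr ⟨p, Or.inr hp, h1, hrest⟩
      · rintro (hc | ⟨p, (rfl | hp), h1, hrest⟩)
        · exact Or.inl hc
        · exact absurd h1 h
        · exact Or.inr ⟨p, hp, h1, hrest⟩

-- characterization of A
theorem isTransGo_iff (full : List (Int × Int)) (gs : List Int) :
    isTransGo full gs = true ↔
    ∀ a ∈ gs, ∀ p ∈ full, p.1 = a → ∀ q ∈ full, q.1 = p.2 → (a, q.2) ∈ full := by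
  induction gs with
  | nil => simp [isTransGo]
  | cons a rest ih =>
    simp only [isTransGo]
    constructor
    · intro h b hb p hp hp1 q hq hq1
      by_cases hall : (full.foldl (fun acc rel =>
          if rel.1 == a then
            full.foldl (fun acc2 rel2 =>
              if rel2.1 == rel.2 then acc2 ++ [rel2.2] else acc2) acc
          else acc) []).all (fun c =>
            full.foldl (fun v rel3 =>
              if rel3.1 == a && rel3.2 == c then true else v) false) = true
      · rw [if_pos hall] at h
        rcases List.mem_cons.mp hb with rfl | hb
        · have hm : q.2 ∈ full.foldl (fun acc rel =>
              if rel.1 == b then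
                full.foldl (fun acc2 rel2 =>
                  if rel2.1 == rel.2 then acc2 ++ [rel2.2] else acc2) acc
              else acc) [] :=
            (tempList_mem full full b q.2 []).mpr
              (Or.inr ⟨p, hp, hp1, q, hq, hq1, rfl⟩)
          have := List.all_eq_true.mp hall _ hm
          rw [foldl_if_true] at this
          simp only [Bool.false_or, List.any_eq_true] at this
          obtain ⟨r, hr, hrc⟩ := this
          simp only [Bool.and_eq_true, beq_iff_eq] at hrc
          have : r = (b, q.2) := Prod.ext hrc.1 hrc.2
          rwa [this] at hr
        · exact (ih.mp h) b hb p hp hp1 q hq hq1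
      · rw [if_neg hall] at h; exact absurd h (by simp)
    · intro h
      have hall : (full.foldl (fun acc rel =>
          if rel.1 == a then
            full.foldl (fun acc2 rel2 =>
              if rel2.1 == rel.2 then acc2 ++ [rel2.2] else acc2) acc
          else acc) []).all (fun c =>
            full.foldl (fun v rel3 =>
              if rel3.1 == a && rel3.2 == c then true else v) false) = true := by
        rw [List.all_eq_true]
        intro c hc
        rcases (tempList_mem full full a c []).mp hc with hx | ⟨p, hp, hp1, q, hq, hq1, hq2⟩
        · simp at hx
        · have hac : (a, c) ∈ full := by
            have := h a (List.mem_cons_self) p hp hp1 q hq hq1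
            rwa [hq2] at this
          rw [foldl_if_true]
          simp only [Bool.false_or, List.any_eq_true]
          exact ⟨(a, c), hac, by simp⟩
      rw [if_pos hall]
      exact ih.mpr (fun b hb => h b (List.mem_cons_of_mem _ hb))

-- adjacency dict built by B: membership of its lists
theorem adj_getD_mem (rs : List (Int × Int)) (d : PySem.Dict Int (List Int)) (b c : Int) :
    (c ∈ (rs.foldl (fun d p => d.modify p.1 [] (fun l => l ++ [p.2])) d).getD b []) ↔
    c ∈ d.getD b [] ∨ (b, c) ∈ rs := by
  induction rs generalizing d with
  | nil => simp
  | cons p rs ih =>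
    simp only [List.foldl_cons, ih, List.mem_cons]
    by_cases h : b = p.1
    · subst h
      rw [PySem.Dict.getD_modify_self]
      simp only [List.mem_append, List.mem_singleton]
      constructor
      · rintro ((hd | rfl) | hr)
        · exact Or.inl hd
        · exact Or.inr (Or.inl (by simp))
        · exact Or.inr (Or.inr hr)
      · rintro (hd | (hpc | hr))
        · exact Or.inl (Or.inl hd)
        · exact Or.inl (Or.inr (by rw [← hpc]))
        · exact Or.inr hr
    · rw [PySem.Dict.getD_modify_of_ne _ _ _ h]
      constructor
      · rintro (hd | hr)
        · exact Or.inl hd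
        · exact Or.inr (Or.inr hr)
      · rintro (hd | (hpc | hr))
        · exact Or.inl hd
        · exact absurd (congrArg Prod.fst hpc) h
        · exact Or.inr hr

-- characterization of B
theorem is_trans_alt_iff (ground : List Int) (relation : List (Int × Int)) :
    is_trans_alt ground relation = true ↔
    ∀ p ∈ relation, p.1 ∈ ground → ∀ c, (p.2, c) ∈ relation → (p.1, c) ∈ relation := by
  have hcg : ∀ x : Int, ((PySem.Set.ofList ground).contains x = true ↔ x ∈ ground) := by
    intro x; simp only [PySem.Set.contains]; rw [List.contains_iff_mem]; exact PySem.Set.mem_ofList ground x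
  have hcr : ∀ x : Int × Int, ((PySem.Set.ofList relation).contains x = true ↔ x ∈ relation) := by
    intro x; simp only [PySem.Set.contains]; rw [List.contains_iff_mem]; exact PySem.Set.mem_ofList relation x
  simp only [is_trans_alt, List.all_eq_true, Bool.or_eq_true, Bool.not_eq_eq_eq_not,
    Bool.not_true]
  constructor
  · intro h p hp hg c hbc
    rcases h p hp with hng | hall
    · have htr := (hcg p.1).mpr hg
      rw [htr] at hng; simp at hng
    · exact (hcr _).mp (hall c ((adj_getD_mem relation PySem.Dict.empty p.2 c).mpr (Or.inr hbc)))
  · intro h p hp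
    by_cases hg : p.1 ∈ ground
    · refine Or.inr (fun c hc => ?_)
      rcases (adj_getD_mem relation PySem.Dict.empty p.2 c).mp hc with hd | hbc
      · simp [PySem.Dict.getD, PySem.Dict.empty, PySem.Dict.get?] at hd
      · exact (hcr _).mpr (h p hp hg c hbc)
    · exact Or.inl (Bool.eq_false_iff.mpr (fun hcon => hg ((hcg p.1).mp hcon)))

-- ===== VERDICT (by name: the statement is the Claim_ definition above) =====
theorem is_trans_spec : Claim_equal_is_trans := by
  intro ground relation _
  unfold Spec_is_trans
  rw [Bool.eq_iff_iff, is_trans, isTransGo_iff, is_trans_alt_iff]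
  constructor
  · intro h p hp hg c hbc
    exact h p.1 hg p hp rfl (p.2, c) hbc rfl
  · intro h a ha p hp hp1 q hq hq1
    have hqe : q = (p.2, q.2) := Prod.ext hq1 rfl
    have := h p hp (hp1 ▸ ha) q.2 (hqe ▸ hq)
    rwa [hp1] at this
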